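-- pv_equiv track=rewrite | github.com/yacoublambaz/EECE230PssSpring2022 | feb22nd.py | minSliceCut
-- ===== SOURCE A (Python) =====
-- def consecutive(L):
--     assert type(L) == list, "L must be list"
--     for num in L:
--         assert type(num) == int, "nums must be integers"
--     for i in range(1,len(L)):
--         if L[i-1] + 1 != L[i]:
--             return False
--     return True
--
-- def minSliceCut(L):
--
--     """
--     Steps:
--     1- start i and j at 0
--     2- increment i and j until we see two non-censective elements
--     3- when you do, increment j until you see that L[i] and L[j] are consecutive
--     4- the window is in between
--     5- what if j goes out of bounds? return L[i:]
--     6- what if i does not start as consecutive, while loop until we do find two consecutive elements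
--     and slice up until those
--     """
--     i = 0
--     j = 0
--     minlen = len(L)
--     minslice = []
--     while i < len(L)-1 and j < len(L):
--         if L[i] == L[i+1]-1:
--             i = i+1
--             j = j+1
--         else:
--             j = j + 1
--             everythingElse = L[:i] + L[j:]
--             if consecutive(everythingElse):
--                 if len(L) - len(everythingElse) < minlen: #if the length of the thing to be sliced is less
--                     minlen = len(L) - len(everythingElse)
--                     minslice = L[i:j]
--     return minslice
-- ===== SOURCE B (Python) =====
-- def minSliceCut(L):
--     n = len(L)
--     # first index p where L[p] + 1 != L[p+1]; None if L is already consecutive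
--     p = next((k for k in range(n - 1) if L[k] + 1 != L[k + 1]), None)
--     if p is None:
--         return []
--     # suff[q] == True  iff  L[q:] is consecutive, computed right-to-left in one pass
--     suff = [True] * (n + 1)
--     for q in range(n - 2, -1, -1):
--         suff[q] = suff[q + 1] and L[q] + 1 == L[q + 1]
--     # smallest q > p with L[:p] + L[q:] consecutive (L[:p] is consecutive by choice of p)
--     for q in range(p + 1, n):
--         if suff[q] and (p == 0 or L[p - 1] + 1 == L[q]):
--             return L[p:q]
--     return L[p:]
-- ===== Notes on version B (the rewrite author's own statement) =====
-- stated objective: faster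
-- what changed: Instead of re-checking consecutive() on the whole remainder for every window end (A's O(n^2) loop), B finds the first break point once, precomputes a suffix-consecutive table right-to-left, and scans for the smallest window end with an O(1) test per position.
import Mathlib
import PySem

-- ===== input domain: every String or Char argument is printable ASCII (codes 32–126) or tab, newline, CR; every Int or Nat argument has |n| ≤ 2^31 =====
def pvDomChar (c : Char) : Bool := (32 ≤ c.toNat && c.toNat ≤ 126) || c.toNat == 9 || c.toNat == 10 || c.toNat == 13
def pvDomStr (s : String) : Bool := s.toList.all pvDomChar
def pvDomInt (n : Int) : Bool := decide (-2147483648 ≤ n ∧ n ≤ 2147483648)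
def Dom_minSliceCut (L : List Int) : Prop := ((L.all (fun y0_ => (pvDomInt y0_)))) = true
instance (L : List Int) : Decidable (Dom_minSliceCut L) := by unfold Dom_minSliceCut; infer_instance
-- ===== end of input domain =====

-- B replaces A's quadratic rescan (a full consecutive() check for every window end) by one
-- first-break search plus a right-to-left suffix-consecutive table with an O(1) test per window end.

-- ===== PORT A =====
-- consecutive(L): the `for i in range(1, len(L))` loop with early `return False` is the
-- short-circuiting `all` over the same index range; all accesses are in range, so getD is exact.
def consecA (L : List Int) : Bool :=
  (List.range' 1 (L.length - 1)).all (fun i => L.getD (i - 1) 0 + 1 == L.getD i 0)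

-- the while loop of minSliceCut; i, j, minlen are nonnegative Python ints (Nat here), and
-- the slices L[:i], L[j:], L[i:j] have nonnegative in-range bounds, so take/drop are exact.
def loopA (L : List Int) (i j minlen : Nat) (minslice : List Int) : List Int :=
  if _h : i < L.length - 1 ∧ j < L.length then
    if L.getD i 0 == L.getD (i + 1) 0 - 1 then
      loopA L (i + 1) (j + 1) minlen minslice
    else
      let j' := j + 1
      let ee := L.take i ++ L.drop j'
      if consecA ee then
        if L.length - ee.length < minlen then
          loopA L i j' (L.length - ee.length) ((L.take j').drop i)
        else
          loopA L i j' minlen minslice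
      else
        loopA L i j' minlen minslice
  else minslice
termination_by L.length - j
decreasing_by all_goals omega

def minSliceCut (L : List Int) : List Int := loopA L 0 0 L.length []

-- ===== PORT B =====
-- p = next((k for k in range(n-1) if L[k]+1 != L[k+1]), None): scan adjacent pairs, k tracks the index
def firstBreakB : List Int → Nat → Option Nat
  | a :: b :: rest, k => if a + 1 == b then firstBreakB (b :: rest) (k + 1) else some k
  | _, _ => none

-- suff table built right-to-left: suffB L is the list [suff[0], …, suff[n]] of Source B
def suffB : List Int → List Bool
  | [] => [true]
  | a :: rest =>
      ((suffB rest).headD true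
        && (match rest with | [] => true | b :: _ => a + 1 == b)) :: suffB rest

-- `for q in range(p+1, n): if suff[q] and (p == 0 or L[p-1]+1 == L[q]): return L[p:q]` then `return L[p:]`
def scanB (L : List Int) (p : Nat) (suff : List Bool) (q : Nat) : List Int :=
  if _h : q < L.length then
    if suff.getD q false && (p == 0 || L.getD (p - 1) 0 + 1 == L.getD q 0) then
      (L.take q).drop p
    else scanB L p suff (q + 1)
  else L.drop p
termination_by L.length - q
decreasing_by all_goals omega

def minSliceCut_alt (L : List Int) : List Int :=
  match firstBreakB L 0 with
  | none => []
  | some p => scanB L p (suffB L) (p + 1)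

-- ===== PRECONDITION & SPEC =====
def Spec_minSliceCut (L : List Int) (out : List Int) : Prop := out = minSliceCut_alt L
instance (L : List Int) (out : List Int) : Decidable (Spec_minSliceCut L out) := by unfold Spec_minSliceCut; infer_instance

-- ===== CLAIM (what is proved, stated in full; the proofs are below) =====
def Claim_equal_minSliceCut : Prop := ∀ (L : List Int), Dom_minSliceCut L → Spec_minSliceCut L (minSliceCut L)

-- ===== LEMMAS AND PROOFS =====

-- "is consecutive" as a proposition
abbrev Csq (l : List Int) : Prop := l.IsChain (fun a b => a + 1 = b)

-- unfolding lemmas for the two loops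
lemma loopA_stop (L : List Int) (i j minlen : Nat) (ms : List Int)
    (h : ¬ (i < L.length - 1 ∧ j < L.length)) : loopA L i j minlen ms = ms := by
  rw [loopA, dif_neg h]

lemma loopA_cons (L : List Int) (i j minlen : Nat) (ms : List Int)
    (h1 : i < L.length - 1) (h2 : j < L.length)
    (heq : L.getD i 0 = L.getD (i + 1) 0 - 1) :
    loopA L i j minlen ms = loopA L (i + 1) (j + 1) minlen ms := by
  rw [loopA, dif_pos ⟨h1, h2⟩, if_pos (by simp only [beq_iff_eq]; exact heq)]

lemma loopA_step (L : List Int) (i j minlen : Nat) (ms : List Int)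
    (h1 : i < L.length - 1) (h2 : j < L.length)
    (hne : ¬ (L.getD i 0 = L.getD (i + 1) 0 - 1)) :
    loopA L i j minlen ms =
      if consecA (L.take i ++ L.drop (j + 1)) then
        if L.length - (L.take i ++ L.drop (j + 1)).length < minlen then
          loopA L i (j + 1) (L.length - (L.take i ++ L.drop (j + 1)).length)
            ((L.take (j + 1)).drop i)
        else loopA L i (j + 1) minlen ms
      else loopA L i (j + 1) minlen ms := by
  rw [loopA, dif_pos ⟨h1, h2⟩, if_neg (by simp only [beq_iff_eq]; exact hne)]

lemma scanB_lt (L : List Int) (p : Nat) (s : List Bool) (q : Nat) (h : q < L.length) :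
    scanB L p s q =
      if s.getD q false && (p == 0 || L.getD (p - 1) 0 + 1 == L.getD q 0) then
        (L.take q).drop p
      else scanB L p s (q + 1) := by
  rw [scanB, dif_pos h]

lemma scanB_ge (L : List Int) (p : Nat) (s : List Bool) (q : Nat) (h : ¬ q < L.length) :
    scanB L p s q = L.drop p := by
  rw [scanB, dif_neg h]

lemma csq_iff_getD (l : List Int) :
    Csq l ↔ ∀ m, m + 1 < l.length → l.getD m 0 + 1 = l.getD (m + 1) 0 := by
  rw [Csq, List.isChain_iff_getElem]
  constructor
  · intro h m hm
    rw [List.getD_eq_getElem _ _ (by omega), List.getD_eq_getElem _ _ hm]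
    exact h m hm
  · intro h i hi
    have := h i hi
    rwa [List.getD_eq_getElem _ _ (by omega), List.getD_eq_getElem _ _ hi] at this

lemma consecA_eq (l : List Int) : consecA l = decide (Csq l) := by
  have h1 : consecA l = true ↔ Csq l := by
    rw [consecA, List.all_eq_true, csq_iff_getD]
    constructor
    · intro h m hm
      have := h (m + 1) (by rw [List.mem_range'_1]; omega)
      simp only [Nat.add_sub_cancel, beq_iff_eq] at this
      exact this
    · intro h i hi
      rw [List.mem_range'_1] at hi
      have := h (i - 1) (by omega)
      have e : i - 1 + 1 = i := by omega
      rw [e] at this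
      simp only [beq_iff_eq]
      exact this
  rw [Bool.eq_iff_iff, h1]
  simp

lemma suffB_length (l : List Int) : (suffB l).length = l.length + 1 := by
  induction l with
  | nil => simp [suffB]
  | cons a rest ih => simp [suffB, ih]

lemma suffB_getD : ∀ (l : List Int) (q : Nat), q ≤ l.length →
    (suffB l).getD q false = decide (Csq (l.drop q))
  | [], 0, _ => by simp [suffB, Csq]
  | [], q + 1, hq => by simp at hq
  | a :: rest, 0, _ => by
      have hhead : (suffB rest).headD true = decide (Csq rest) := by
        have h0 := suffB_getD rest 0 (Nat.zero_le _)
        have hl := suffB_length rest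
        rcases hrec : suffB rest with _ | ⟨c, s'⟩
        · rw [hrec] at hl; simp at hl
        · rw [hrec] at h0; simpa using h0
      cases rest with
      | nil => simp [suffB, Csq]
      | cons b t =>
          have hdef : suffB (a :: b :: t)
              = ((suffB (b :: t)).headD true && (a + 1 == b)) :: suffB (b :: t) := rfl
          rw [hdef, List.getD_cons_zero, hhead, Bool.eq_iff_iff]
          simp [List.isChain_cons_cons, beq_iff_eq, and_comm]
  | a :: rest, q + 1, hq => by
      have := suffB_getD rest q (by simpa using hq)
      simpa [suffB] using this

lemma fb_none : ∀ (l : List Int) (k : Nat), firstBreakB l k = none → Csq l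
  | [], _, _ => by simp [Csq]
  | [a], _, _ => by simp [Csq]
  | a :: b :: rest, k, h => by
      by_cases hab : a + 1 = b
      · rw [firstBreakB, if_pos (by simpa [beq_iff_eq])] at h
        exact List.isChain_cons_cons.mpr ⟨hab, fb_none (b :: rest) (k + 1) h⟩
      · rw [firstBreakB, if_neg (by simpa [beq_iff_eq])] at h
        simp at h

lemma fb_some : ∀ (l : List Int) (k p : Nat), firstBreakB l k = some p →
    k ≤ p ∧ p - k + 1 < l.length ∧
    (∀ m, m < p - k → l.getD m 0 + 1 = l.getD (m + 1) 0) ∧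
    ¬ (l.getD (p - k) 0 + 1 = l.getD (p - k + 1) 0)
  | [], k, p, h => by simp [firstBreakB] at h
  | [a], k, p, h => by simp [firstBreakB] at h
  | a :: b :: rest, k, p, h => by
      by_cases hab : a + 1 = b
      · rw [firstBreakB, if_pos (by simpa [beq_iff_eq])] at h
        obtain ⟨h1, h2, h3, h4⟩ := fb_some (b :: rest) (k + 1) p h
        refine ⟨by omega, by simp only [List.length_cons] at h2 ⊢; omega, ?_, ?_⟩
        · intro m hm
          cases m with
          | zero => simpa using hab
          | succ m' =>
              have := h3 m' (by omega)
              simpa using this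
        · have hpk : p - k = (p - (k + 1)) + 1 := by omega
          rw [hpk]
          simpa using h4
      · rw [firstBreakB, if_neg (by simpa [beq_iff_eq])] at h
        obtain rfl : k = p := by simpa using h
        refine ⟨le_rfl, by simp, ?_, ?_⟩
        · intro m hm; omega
        · simpa using hab

lemma lA_done (L : List Int)
    (hcons : ∀ m, m + 1 < L.length → L.getD m 0 + 1 = L.getD (m + 1) 0) :
    ∀ i, loopA L i i L.length [] = [] := by
  suffices H : ∀ fuel i, L.length - i ≤ fuel → loopA L i i L.length [] = [] by
    intro i; exact H (L.length - i) i le_rfl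
  intro fuel
  induction fuel with
  | zero => intro i hi; exact loopA_stop L i i L.length [] (by omega)
  | succ f ih =>
      intro i hi
      by_cases h : i < L.length - 1 ∧ i < L.length
      · rw [loopA_cons L i i L.length [] h.1 h.2 (by have := hcons i (by omega); omega)]
        exact ih (i + 1) (by omega)
      · exact loopA_stop L i i L.length [] h

lemma lA_phase1 (L : List Int) (p : Nat) (hp : p + 1 < L.length)
    (ptw : ∀ m, m < p → L.getD m 0 + 1 = L.getD (m + 1) 0) :
    ∀ i, i ≤ p → loopA L i i L.length [] = loopA L p p L.length [] := by
  suffices H : ∀ fuel i, i ≤ p → p - i ≤ fuel →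
      loopA L i i L.length [] = loopA L p p L.length [] by
    intro i hip; exact H (p - i) i hip le_rfl
  intro fuel
  induction fuel with
  | zero =>
      intro i hip hf
      have : i = p := by omega
      rw [this]
  | succ f ih =>
      intro i hip hf
      rcases eq_or_lt_of_le hip with rfl | hlt
      · rfl
      · rw [loopA_cons L i i L.length [] (by omega) (by omega)
            (by have := ptw i hlt; omega)]
        exact ih (i + 1) (by omega) (by omega)

lemma lA_after (L : List Int) (p : Nat) (hp : p + 1 < L.length)
    (hbr : ¬ (L.getD p 0 + 1 = L.getD (p + 1) 0)) :
    ∀ j minlen minslice, p ≤ j → minlen ≤ j - p →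
      loopA L p j minlen minslice = minslice := by
  suffices H : ∀ fuel j minlen minslice, p ≤ j → minlen ≤ j - p → L.length - j ≤ fuel →
      loopA L p j minlen minslice = minslice by
    intro j ml ms hj hm; exact H (L.length - j) j ml ms hj hm le_rfl
  intro fuel
  induction fuel with
  | zero => intro j ml ms hj hm hf; exact loopA_stop L p j ml ms (by omega)
  | succ f ih =>
      intro j ml ms hj hm hf
      by_cases hcond : p < L.length - 1 ∧ j < L.length
      · rw [loopA_step L p j ml ms hcond.1 hcond.2 (by omega)]
        have hee : (L.take p ++ L.drop (j + 1)).length = p + (L.length - (j + 1)) := by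
          simp [List.length_append, List.length_take, List.length_drop]
          omega
        have hnl : ¬ (L.length - (L.take p ++ L.drop (j + 1)).length < ml) := by
          rw [hee]; omega
        rw [if_neg hnl]
        have hrec := ih (j + 1) ml ms (by omega) (by omega) (by omega)
        split <;> exact hrec
      · exact loopA_stop L p j ml ms hcond

lemma lA_scan (L : List Int) (p : Nat) (hp : p + 1 < L.length)
    (hbr : ¬ (L.getD p 0 + 1 = L.getD (p + 1) 0))
    (hcons : Csq (L.take p)) :
    ∀ j, p ≤ j → (∀ q, p < q → q ≤ j → ¬ Csq (L.take p ++ L.drop q)) →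
      loopA L p j L.length [] = scanB L p (suffB L) (j + 1) := by
  suffices H : ∀ fuel j, p ≤ j → (∀ q, p < q → q ≤ j → ¬ Csq (L.take p ++ L.drop q)) →
      L.length - j ≤ fuel → loopA L p j L.length [] = scanB L p (suffB L) (j + 1) by
    intro j hj hfail; exact H (L.length - j) j hj hfail le_rfl
  intro fuel
  induction fuel with
  | zero =>
      intro j hj hfail hf
      exfalso
      apply hfail L.length (by omega) (by omega)
      rw [List.drop_length, List.append_nil]
      exact hcons
  | succ f ih =>
      intro j hj hfail hf
      by_cases hjlen : j < L.length
      swap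
      · exfalso
        apply hfail L.length (by omega) (by omega)
        rw [List.drop_length, List.append_nil]
        exact hcons
      rw [loopA_step L p j L.length [] (by omega) hjlen (by omega)]
      have hee : (L.take p ++ L.drop (j + 1)).length = p + (L.length - (j + 1)) := by
        simp [List.length_append, List.length_take, List.length_drop]
        omega
      by_cases hq1 : j + 1 < L.length
      · -- scanB tests q = j + 1
        have hiff : Csq (L.take p ++ L.drop (j + 1)) ↔
            Csq (L.drop (j + 1)) ∧ (p = 0 ∨ L.getD (p - 1) 0 + 1 = L.getD (j + 1) 0) := by
          rw [Csq, List.isChain_append]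
          have hhead : (L.drop (j + 1)).head? = some (L.getD (j + 1) 0) := by
            rw [List.head?_drop, List.getElem?_eq_getElem hq1,
              List.getD_eq_getElem _ _ hq1]
          rcases Nat.eq_zero_or_pos p with hp0 | hp0
          · subst hp0
            simp [hhead]
          · have hplen : (L.take p).length = p := by rw [List.length_take]; omega
            have hlast : (L.take p).getLast? = some (L.getD (p - 1) 0) := by
              have h1 : p - 1 < (L.take p).length := by rw [hplen]; omega
              rw [List.getLast?_eq_getElem?, hplen, List.getElem?_eq_getElem h1,
                List.getElem_take, List.getD_eq_getElem _ _ (by omega)]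
            constructor
            · rintro ⟨-, h2, h3⟩
              refine ⟨h2, Or.inr ?_⟩
              have := h3 _ (by rw [hlast]; rfl) _ (by rw [hhead]; rfl)
              exact this
            · rintro ⟨h2, h3⟩
              refine ⟨hcons, h2, ?_⟩
              intro x hx y hy
              rw [hlast] at hx
              rw [hhead] at hy
              simp at hx hy
              subst hx; subst hy
              rcases h3 with h3 | h3
              · omega
              · exact h3
        rw [scanB_lt L p (suffB L) (j + 1) hq1]
        by_cases hCsq : Csq (L.take p ++ L.drop (j + 1))
        · obtain ⟨hd, hor⟩ := hiff.mp hCsq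
          have hcond2 : ((suffB L).getD (j + 1) false
              && (p == 0 || L.getD (p - 1) 0 + 1 == L.getD (j + 1) 0)) = true := by
            rw [suffB_getD L (j + 1) (by omega)]
            simp only [Bool.and_eq_true, Bool.or_eq_true, beq_iff_eq,
              decide_eq_true_eq]
            exact ⟨hd, hor⟩
          have hlt : L.length - (L.take p ++ L.drop (j + 1)).length < L.length := by
            rw [hee]; omega
          rw [consecA_eq, if_pos (show decide (Csq (L.take p ++ L.drop (j + 1))) = true
                by simp [hCsq]), if_pos hlt, if_pos hcond2]
          exact lA_after L p hp hbr (j + 1)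
            (L.length - (L.take p ++ L.drop (j + 1)).length)
            ((L.take (j + 1)).drop p) (by omega) (by rw [hee]; omega)
        · have hcond2 : ¬ (((suffB L).getD (j + 1) false
              && (p == 0 || L.getD (p - 1) 0 + 1 == L.getD (j + 1) 0)) = true) := by
            intro hc
            apply hCsq
            apply hiff.mpr
            rw [suffB_getD L (j + 1) (by omega)] at hc
            simp only [Bool.and_eq_true, Bool.or_eq_true, beq_iff_eq,
              decide_eq_true_eq] at hc
            exact ⟨hc.1, hc.2⟩
          rw [consecA_eq, if_neg (show ¬ (decide (Csq (L.take p ++ L.drop (j + 1))) = true)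
                by simp [hCsq]), if_neg hcond2]
          refine ih (j + 1) (by omega) ?_ (by omega)
          intro q hq hq2
          rcases Nat.lt_or_ge j q with hlt | hge
          · have : q = j + 1 := by omega
            rw [this]; exact hCsq
          · exact hfail q hq (by omega)
      · -- j + 1 = L.length : last iteration; scanB falls through to L.drop p
        have hj1 : j + 1 = L.length := by omega
        rw [scanB_ge L p (suffB L) (j + 1) (by omega)]
        have heeq : L.take p ++ L.drop (j + 1) = L.take p := by
          rw [hj1, List.drop_length, List.append_nil]
        rcases Nat.eq_zero_or_pos p with hp0 | hp0
        · exfalso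
          apply hfail (L.length - 1) (by omega) (by omega)
          rw [csq_iff_getD]
          intro m hm
          exfalso
          rw [List.length_append, List.length_take, List.length_drop] at hm
          omega
        · have hplen : (L.take p).length = p := by rw [List.length_take]; omega
          have hlt : L.length - (L.take p).length < L.length := by rw [hplen]; omega
          rw [heeq, consecA_eq,
            if_pos (show decide (Csq (L.take p)) = true by simp [hcons]), if_pos hlt,
            lA_after L p hp hbr (j + 1) _ _ (by omega) (by rw [hplen]; omega),
            hj1, List.take_length]

-- ===== VERDICT (by name: the statement is the Claim_ definition above) =====
theorem minSliceCut_spec : Claim_equal_minSliceCut := by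
  intro L _
  unfold Spec_minSliceCut minSliceCut minSliceCut_alt
  cases hfb : firstBreakB L 0 with
  | none =>
      exact lA_done L ((csq_iff_getD L).mp (fb_none L 0 hfb)) 0
  | some p =>
      obtain ⟨-, hp, ptw, hbr⟩ := fb_some L 0 p hfb
      simp only [Nat.sub_zero] at hp ptw hbr
      have hcons : Csq (L.take p) := by
        rw [csq_iff_getD]
        intro m hm
        simp only [List.length_take] at hm
        rw [List.getD_eq_getElem _ _ (by simp; omega), List.getD_eq_getElem _ _ (by simp; omega)]
        simp only [List.getElem_take]
        have := ptw m (by omega)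
        rwa [List.getD_eq_getElem _ _ (by omega), List.getD_eq_getElem _ _ (by omega)] at this
      rw [lA_phase1 L p hp ptw 0 (Nat.zero_le _)]
      exact lA_scan L p hp hbr hcons p le_rfl (by omega)
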